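-- pv_equiv track=rewrite | github.com/ggordonhall/lyrics_gen | utils/text.py | clean_commas
-- ===== SOURCE A (Python) =====
-- from typing import List
--
-- def clean_commas(song_list: List[str]) -> List[str]:
--     """
--     Remove trailing commas from the end of a
--     verse.
--     """
--     res = []
--     for idx, line in enumerate(song_list):
--         if line[-1] == ',':
--             if idx + 1 >= len(song_list) or song_list[idx + 1] == '':
--                 line = line[:-1]
--         res.append(line)
--     return res
-- ===== SOURCE B (Python) =====
-- def clean_commas(song_list):
--     """
--     Remove trailing commas from the end of a
--     verse (single reverse pass carrying a
--     'next line is a verse break / end' flag).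
--     """
--     res = []
--     next_end = True
--     for line in reversed(song_list):
--         is_empty = (line == '')
--         if next_end and line.endswith(','):
--             line = line[:-1]
--         next_end = is_empty
--         res.append(line)
--     return res[::-1]
-- ===== Notes on version B (the rewrite author's own statement) =====
-- stated objective: alternative
-- what changed: Replaces A's forward loop that peeks ahead with song_list[idx+1]/len() by a single reverse-order pass carrying a 'next line is a verse break or the end' boolean flag (no index arithmetic), reversed at the end.
-- outside the precondition, e.g. on clean_commas(['la,', '', 'da']): A raises IndexError, B returns ['la', '', 'da']
-- crash fix: On any list containing an empty line A raises IndexError at line[-1]; B returns the list with trailing commas stripped exactly at verse ends (lines before an empty line or the last line). — e.g. on clean_commas(["la,", "", "da"]): A raises IndexError, B returns ["la", "", "da"]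
import Mathlib
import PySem

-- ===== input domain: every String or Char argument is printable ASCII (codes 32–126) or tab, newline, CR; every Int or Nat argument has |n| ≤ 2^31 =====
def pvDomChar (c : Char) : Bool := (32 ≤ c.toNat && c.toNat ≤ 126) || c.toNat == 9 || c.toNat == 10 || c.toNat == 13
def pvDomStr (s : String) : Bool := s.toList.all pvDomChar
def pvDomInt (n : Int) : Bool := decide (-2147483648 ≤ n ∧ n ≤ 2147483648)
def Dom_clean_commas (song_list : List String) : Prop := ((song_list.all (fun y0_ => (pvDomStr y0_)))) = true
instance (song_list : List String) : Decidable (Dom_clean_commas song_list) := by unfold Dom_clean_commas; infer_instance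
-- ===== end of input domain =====

-- B replaces A's index-ahead scan by a single reverse pass carrying a 'next line is a verse break / end'
-- flag (objective: alternative decomposition; B also returns where A raises on empty lines).

-- ===== PORT A =====
def clean_commas (song_list : List String) : List String :=
  (PySem.List.enumerate song_list).foldl
    (fun res p =>
      let line : String :=
        match PySem.Str.pyGet? p.2 (-1) with
        | some c =>
            if c = ',' then
              if (p.1 + 1 ≥ (song_list.length : Int)) ∨
                 PySem.List.pyGet? song_list (p.1 + 1) = some "" then
                PySem.Str.slice p.2 none (some (-1))
              else p.2
            else p.2
        | none => p.2   -- line[-1] raises IndexError on an empty line: excluded by Pre_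
      res ++ [line])
    []

-- ===== PORT B =====
def clean_commas_alt (song_list : List String) : List String :=
  let st := song_list.reverse.foldl
    (fun (st : List String × Bool) line =>
      let isEmpty := line == ""
      let line :=
        if st.2 && PySem.Str.endswith line "," then PySem.Str.slice line none (some (-1))
        else line
      (st.1 ++ [line], isEmpty))
    ([], true)
  st.1.reverse   -- res[::-1]  (PySem.List.slice?_none_none_neg_one: step -1 slice is reverse)

-- ===== PRECONDITION & SPEC =====
-- Pre_ excludes exactly the inputs containing an empty line, on which A raises IndexError at line[-1].
def Pre_clean_commas (song_list : List String) : Prop := ∀ s ∈ song_list, s ≠ ""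
instance (song_list : List String) : Decidable (Pre_clean_commas song_list) := by
  unfold Pre_clean_commas; infer_instance
def pvWitness_clean_commas : List String := ["hello,", "world,"]

-- A raises IndexError on any list containing an empty line; B returns the list with trailing commas
-- stripped at verse ends (before an empty line or at the end).
def Raises_clean_commas (song_list : List String) : Prop := "" ∈ song_list
instance (song_list : List String) : Decidable (Raises_clean_commas song_list) := by
  unfold Raises_clean_commas; infer_instance
def pvRaiseWitness_clean_commas : List String := ["la,", "", "da"]
def pvRaiseWitnessOut_clean_commas : List String := ["la", "", "da"]

def Spec_clean_commas (song_list : List String) (out : List String) : Prop :=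
  out = clean_commas_alt song_list
instance (song_list : List String) (out : List String) : Decidable (Spec_clean_commas song_list out) := by
  unfold Spec_clean_commas; infer_instance

-- ===== CLAIM (what is proved, stated in full; the proofs are below) =====
def Claim_equal_clean_commas : Prop := ∀ (song_list : List String), Dom_clean_commas song_list → Pre_clean_commas song_list → Spec_clean_commas song_list (clean_commas song_list)
def Claim_raises_clean_commas : Prop := (∀ (song_list : List String), Dom_clean_commas song_list → Raises_clean_commas song_list → ¬ Pre_clean_commas song_list) ∧ (Dom_clean_commas (pvRaiseWitness_clean_commas) ∧ Raises_clean_commas (pvRaiseWitness_clean_commas) ∧ clean_commas_alt (pvRaiseWitness_clean_commas) = pvRaiseWitnessOut_clean_commas)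

-- ===== LEMMAS AND PROOFS =====

-- the value both programs give the line at a verse end
def pvStrip (l : String) : String :=
  if PySem.Str.endswith l "," then PySem.Str.slice l none (some (-1)) else l

-- the common normal form under Pre_: strip only the final line
def pvTarget (xs : List String) : List String :=
  xs.dropLast ++ (xs.getLast?.map pvStrip).toList

theorem pvLastChar_comma_iff (l : String) :
    PySem.Str.pyGet? l (-1) = some ',' ↔ PySem.Str.endswith l "," := by
  rw [PySem.Str.pyGet?_eq, PySem.Chars.pyGet?_eq_listPyGet?, PySem.List.pyGet?_neg_one,
      PySem.Str.endswith_eq, PySem.Chars.endswith_iff]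
  have hc : (",").toList = [','] := rfl
  rw [hc]
  constructor
  · intro hs
    obtain ⟨ys, hys⟩ := List.getLast?_eq_some_iff.mp hs
    rw [hys]
    exact List.suffix_append ys [',']
  · intro hs
    obtain ⟨ys, hys⟩ := hs
    rw [← hys, List.getLast?_concat]

theorem pvGetLast_ne_none (l : String) (h : l ≠ "") :
    PySem.Str.pyGet? l (-1) ≠ none := by
  rw [PySem.Str.pyGet?_eq, PySem.Chars.pyGet?_eq_listPyGet?, PySem.List.pyGet?_neg_one]
  intro hn
  apply h
  have h0 : l.toList = [] := List.getLast?_eq_none_iff.mp hn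
  have h1 := congrArg String.ofList h0
  simpa using h1

theorem clean_commas_eq_target (xs : List String) (h : Pre_clean_commas xs) :
    clean_commas xs = pvTarget xs := by
  obtain rfl | ⟨ys, z, rfl⟩ := xs.eq_nil_or_concat
  · rfl
  · rw [List.concat_eq_append] at h ⊢
    have hz : z ≠ "" := h z (by simp)
    simp only [clean_commas]
    rw [PySem.List.foldl_append_singleton_eq_map, PySem.List.enumerate_append,
        PySem.List.enumerate_cons, PySem.List.enumerate_nil, List.map_append]
    have hpre : ∀ p ∈ PySem.List.enumerate ys 0,
        (fun (p : Int × String) =>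
          match PySem.Str.pyGet? p.2 (-1) with
          | some c =>
              if c = ',' then
                if (p.1 + 1 ≥ ((ys ++ [z]).length : Int)) ∨
                   PySem.List.pyGet? (ys ++ [z]) (p.1 + 1) = some "" then
                  PySem.Str.slice p.2 none (some (-1))
                else p.2
              else p.2
          | none => p.2) p = p.2 := by
      intro p hp
      obtain ⟨k, hk, rfl⟩ := (PySem.List.mem_enumerate_iff ys 0 p).mp hp
      have hne : ¬((0 + (k : Int) + 1 ≥ ((ys ++ [z]).length : Int)) ∨
          PySem.List.pyGet? (ys ++ [z]) (0 + (k : Int) + 1) = some "") := by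
        rintro (h1 | h2)
        · revert h1
          simp
          omega
        · exact h "" (PySem.List.mem_of_pyGet?_eq_some _ h2) rfl
      show (match PySem.Str.pyGet? ys[k] (-1) with
        | some c =>
            if c = ',' then
              if ((0 : Int) + (k : Int) + 1 ≥ ((ys ++ [z]).length : Int)) ∨
                 PySem.List.pyGet? (ys ++ [z]) ((0 : Int) + (k : Int) + 1) = some "" then
                PySem.Str.slice ys[k] none (some (-1))
              else ys[k]
            else ys[k]
        | none => ys[k]) = ys[k]
      rcases hcz : PySem.Str.pyGet? ys[k] (-1) with _ | c
      · rfl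
      · rw [if_neg hne]
        exact ite_self _
    rw [List.map_congr_left hpre, PySem.List.map_snd_enumerate]
    have hlast :
        (match PySem.Str.pyGet? z (-1) with
          | some c =>
              if c = ',' then
                if ((0 + (ys.length : Int)) + 1 ≥ ((ys ++ [z]).length : Int)) ∨
                   PySem.List.pyGet? (ys ++ [z]) ((0 + (ys.length : Int)) + 1) = some "" then
                  PySem.Str.slice z none (some (-1))
                else z
              else z
          | none => z) = pvStrip z := by
      have hcond : ((0 + (ys.length : Int)) + 1 ≥ ((ys ++ [z]).length : Int)) ∨
          PySem.List.pyGet? (ys ++ [z]) ((0 + (ys.length : Int)) + 1) = some "" := by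
        left; simp
      rcases hcz : PySem.Str.pyGet? z (-1) with _ | c
      · exact absurd hcz (pvGetLast_ne_none z hz)
      · by_cases hcc : c = ','
        · subst hcc
          have hew : PySem.Str.endswith z "," := (pvLastChar_comma_iff z).mp hcz
          have hew' : PySem.Chars.endswith z.toList [','] = true := by
            rw [show ([','] : List Char) = (",").toList from rfl, ← PySem.Str.endswith_eq]
            exact hew
          simp [pvStrip, hew']
        · have hew : PySem.Str.endswith z "," = false := by
            rcases hb : PySem.Str.endswith z "," with _ | _
            · rfl
            · exfalso
              have := (pvLastChar_comma_iff z).mpr hb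
              rw [hcz] at this
              exact hcc (Option.some.inj this)
          have hew' : PySem.Chars.endswith z.toList [','] = false := by
            rw [show ([','] : List Char) = (",").toList from rfl, ← PySem.Str.endswith_eq]
            exact hew
          simp [hcc, pvStrip, hew']
    simp only [List.map_cons, List.map_nil, pvTarget, List.dropLast_concat,
      List.getLast?_concat, Option.map_some, Option.toList_some]
    exact congrArg (fun w => ys ++ [w]) hlast

theorem pvB_loop (l : List String) (acc : List String) (hl : ∀ x ∈ l, x ≠ "") :
    l.foldl (fun (st : List String × Bool) line =>
        (st.1 ++ [if st.2 && PySem.Str.endswith line "," then PySem.Str.slice line none (some (-1))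
                  else line], line == "")) (acc, false)
      = (acc ++ l, false) := by
  induction l generalizing acc with
  | nil => simp
  | cons x t ih =>
    have hx : (x == "") = false := beq_eq_false_iff_ne.mpr (hl x (List.mem_cons_self))
    simp only [List.foldl_cons, hx, Bool.false_and, Bool.false_eq_true, if_false]
    rw [ih (acc ++ [x]) (fun y hy => hl y (List.mem_cons_of_mem x hy))]
    simp

theorem clean_commas_alt_eq_target (xs : List String) (h : Pre_clean_commas xs) :
    clean_commas_alt xs = pvTarget xs := by
  obtain rfl | ⟨ys, z, rfl⟩ := xs.eq_nil_or_concat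
  · rfl
  · rw [List.concat_eq_append] at h ⊢
    have hz : z ≠ "" := h z (by simp)
    have hz' : (z == "") = false := beq_eq_false_iff_ne.mpr hz
    simp only [clean_commas_alt, List.reverse_append, List.reverse_singleton,
      List.singleton_append, List.foldl_cons, Bool.true_and, hz', List.nil_append]
    rw [pvB_loop ys.reverse
      [if PySem.Str.endswith z "," then PySem.Str.slice z none (some (-1)) else z]
      (fun y hy => h y (by simp at hy; simp [hy]))]
    simp [pvTarget, pvStrip]

-- ===== VERDICT (by name: the statement is the Claim_ definition above) =====
theorem clean_commas_spec : Claim_equal_clean_commas := by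
  intro xs _ hpre
  unfold Spec_clean_commas
  rw [clean_commas_eq_target xs hpre, clean_commas_alt_eq_target xs hpre]

theorem clean_commas_raises : Claim_raises_clean_commas := by
  unfold Claim_raises_clean_commas
  refine ⟨?_, by decide⟩
  intro xs _ hr hp
  exact hp "" hr rfl

-- self-check: the raises-witness value, read back out of clean_commas_raises
theorem clean_commas_raises_witness :
    clean_commas_alt pvRaiseWitness_clean_commas = pvRaiseWitnessOut_clean_commas :=
  clean_commas_raises.2.2.2
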